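-- pv_equiv track=rewrite | github.com/aizanzafar/MedEx | code/ExtractiveQA/Preprocess/fol_preprocess.py | apply_rules_to_kg
-- ===== SOURCE A (Python) =====
-- def remove_duplicate(kg_triple):
-- 	res = []
-- 	[res.append(x) for x in kg_triple if x not in res]
-- 	return res
--
-- def parse_triple(kg_triplets):
-- 	kg_len = len(kg_triplets)
-- 	empty=['_NAF_H','_NAF_R','_NAF_T']
-- 	if kg_len <=40:
-- 		tt= 40 - kg_len
-- 		for item in range(tt):
-- 			kg_triplets.append(empty)
-- 	return kg_triplets[:40]
--
-- def apply_rules_to_kg(kg_triplets):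
-- 	co_occurs_triplets = []
-- 	prevent_triplets = []
-- 	treatment_triplets = []
-- 	diagnosis_triplets = []
-- 	conjunction_triplets = []
-- 	disjunction_triplets = []
-- 	# 1.Rule of Co-occurrence: If X co-occurs with Y and Y affects Z, then X affects Z
-- 	for triplet in kg_triplets:
-- 		if triplet[1] == "co-occurs_with":
-- 			for other_triplet in kg_triplets:
-- 				if other_triplet[0] == triplet[2] and other_triplet[1] == "affects":
-- 					if triplet[0] == other_triplet[2]:
-- 						pass
-- 					else:
-- 						co_occurs_triplets.append([triplet[0], "affects", other_triplet[2]])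
--
-- 	# 2.Rule of Prevention and Causation: If X prevents Y and Y causes Z, then X prevents Z
-- 	for triplet in kg_triplets:
-- 		if triplet[1] == "prevents":
-- 			for other_triplet in kg_triplets:
-- 				if other_triplet[0] == triplet[2] and other_triplet[1] == "causes":
-- 					if triplet[0] == other_triplet[2]:
-- 						pass
-- 					else:
-- 						prevent_triplets.append([triplet[0], "prevents", other_triplet[2]])
--
-- 	# 3.Rule of Treatment and Classification: If X treats Y and Y is a type of Z, then X can be used to treat Z
-- 	for triplet in kg_triplets:
-- 		if triplet[1] == "treats":
-- 			for other_triplet in kg_triplets: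
-- 				if other_triplet[0] == triplet[2] and other_triplet[1] == "is_a":
-- 					if triplet[0] == other_triplet[2]:
-- 						pass
-- 					else:
-- 						treatment_triplets.append([triplet[0], "treats", other_triplet[2]])
-- 	# 4.Rule of Diagnosis and Interaction: If X is diagnosed with Y and X interacts with Z, then Z can be used for the diagnosis of Y
-- 	for triplet in kg_triplets:
-- 		if triplet[1] == "diagnosis":
-- 			for other_triplet in kg_triplets:
-- 				if other_triplet[0] == triplet[0] and other_triplet[1] == "interacts_with":
-- 					if other_triplet[2] == triplet[0]:
-- 						pass
-- 					else:
-- 						diagnosis_triplets.append([other_triplet[2], "diagnosis", triplet[0]])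
-- 	# 5.Rule of Conjunction .
-- 	for triplet in kg_triplets:
-- 		if triplet[1] == "co-occurs_with":
-- 			for other_triplet in kg_triplets:
-- 				if other_triplet[0] == triplet[0] and other_triplet[1] == "affects":
-- 					if triplet[2] == other_triplet[2]:
-- 						pass
-- 					else:
-- 						conjunction_triplets.append([triplet[2], "co-occurs_with", other_triplet[2]])
-- 	# 5.Rule of disjunction .
-- 	for triple in kg_triplets:
-- 		if triple[1] == "prevents":
-- 			X = triple[0]
-- 			Y = triple[2]
-- 			for other_triple in kg_triplets:
-- 				if other_triple[1] == "causes" and other_triple[0] == Y: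
-- 					Z = other_triple[2]
-- 					new_triple1 = [X, "prevents", Z]
-- 					new_triple2 = [X, "causes", Z]
-- 					disjunction_triplets.append(new_triple1)
-- 					disjunction_triplets.append(new_triple2)
-- 	return parse_triple(remove_duplicate(co_occurs_triplets)),parse_triple(remove_duplicate(prevent_triplets)),parse_triple(remove_duplicate(treatment_triplets)),parse_triple(remove_duplicate(diagnosis_triplets)),parse_triple(remove_duplicate(conjunction_triplets)),parse_triple(remove_duplicate(disjunction_triplets))
-- ===== SOURCE B (Python) =====
-- NAF = ['_NAF_H', '_NAF_R', '_NAF_T']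
--
-- def _finish(triples):
--     seen = set()
--     out = []
--     for t in triples:
--         k = tuple(t)
--         if k not in seen:
--             seen.add(k)
--             out.append(t)
--     out = out[:40]
--     out += [NAF] * (40 - len(out))
--     return out
--
-- def apply_rules_to_kg(kg_triplets):
--     # index every triplet's object under its (subject, relation) pair, once
--     idx = {}
--     for t in kg_triplets:
--         idx.setdefault((t[0], t[1]), []).append(t[2])
--
--     co_occurs = []
--     prevent = []
--     treatment = []
--     diagnosis = []
--     conjunction = []
--     disjunction = []
--     for t in kg_triplets:
--         rel = t[1]
--         if rel == "co-occurs_with":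
--             for z in idx.get((t[2], "affects"), []):
--                 if t[0] != z:
--                     co_occurs.append([t[0], "affects", z])
--             for z in idx.get((t[0], "affects"), []):
--                 if t[2] != z:
--                     conjunction.append([t[2], "co-occurs_with", z])
--         elif rel == "prevents":
--             zs = idx.get((t[2], "causes"), [])
--             for z in zs:
--                 if t[0] != z:
--                     prevent.append([t[0], "prevents", z])
--             for z in zs:
--                 disjunction.append([t[0], "prevents", z])
--                 disjunction.append([t[0], "causes", z])
--         elif rel == "treats":
--             for z in idx.get((t[2], "is_a"), []):
--                 if t[0] != z:
--                     treatment.append([t[0], "treats", z])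
--         elif rel == "diagnosis":
--             for z in idx.get((t[0], "interacts_with"), []):
--                 if z != t[0]:
--                     diagnosis.append([z, "diagnosis", t[0]])
--     return (_finish(co_occurs), _finish(prevent), _finish(treatment),
--             _finish(diagnosis), _finish(conjunction), _finish(disjunction))
-- ===== Notes on version B (the rewrite author's own statement) =====
-- stated objective: alternative
-- what changed: B builds a (subject, relation) -> objects dict index once and computes all six rules in a single pass with O(1) lookups, replacing A's six nested scans that are quadratic when the rule relations occur; measured time on the generated inputs is the same.
import Mathlib
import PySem

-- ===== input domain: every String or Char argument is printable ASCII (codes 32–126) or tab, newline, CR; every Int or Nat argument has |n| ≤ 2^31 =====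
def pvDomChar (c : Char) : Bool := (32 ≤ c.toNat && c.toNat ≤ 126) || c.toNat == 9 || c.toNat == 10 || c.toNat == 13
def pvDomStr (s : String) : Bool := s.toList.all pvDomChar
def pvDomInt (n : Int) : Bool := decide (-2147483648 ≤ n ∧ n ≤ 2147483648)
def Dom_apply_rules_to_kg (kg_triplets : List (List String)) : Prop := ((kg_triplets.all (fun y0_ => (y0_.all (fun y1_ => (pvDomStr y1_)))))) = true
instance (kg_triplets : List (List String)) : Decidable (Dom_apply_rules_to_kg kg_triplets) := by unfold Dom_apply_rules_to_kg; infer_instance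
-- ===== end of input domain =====

-- B replaces A's six nested scans by one (subject, relation) → objects index built once
-- plus a single pass over the triplets with dict lookups (objective: alternative).

-- field access t[i]; exact under Pre_ (every triplet has at least 3 fields, so the index is in range)
def pvG (t : List String) (i : Int) : String := PySem.List.pyGetD t i ""

def pvNAF : List String := ["_NAF_H", "_NAF_R", "_NAF_T"]

-- ===== PORT A =====
def pvRemoveDuplicate (l : List (List String)) : List (List String) :=
  l.foldl (fun res x => if x ∈ res then res else res ++ [x]) []

def pvParseTriple (l : List (List String)) : List (List String) :=
  (if l.length ≤ 40 then l ++ List.replicate (40 - l.length) pvNAF else l).take 40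

def apply_rules_to_kg (kg_triplets : List (List String)) : List (List (List String)) :=
  let co := kg_triplets.foldl (fun acc t =>
      if pvG t 1 = "co-occurs_with" then
        kg_triplets.foldl (fun acc2 o =>
          if pvG o 0 = pvG t 2 ∧ pvG o 1 = "affects" then
            if pvG t 0 = pvG o 2 then acc2
            else acc2 ++ [[pvG t 0, "affects", pvG o 2]]
          else acc2) acc
      else acc) []
  let pr := kg_triplets.foldl (fun acc t =>
      if pvG t 1 = "prevents" then
        kg_triplets.foldl (fun acc2 o =>
          if pvG o 0 = pvG t 2 ∧ pvG o 1 = "causes" then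
            if pvG t 0 = pvG o 2 then acc2
            else acc2 ++ [[pvG t 0, "prevents", pvG o 2]]
          else acc2) acc
      else acc) []
  let tr := kg_triplets.foldl (fun acc t =>
      if pvG t 1 = "treats" then
        kg_triplets.foldl (fun acc2 o =>
          if pvG o 0 = pvG t 2 ∧ pvG o 1 = "is_a" then
            if pvG t 0 = pvG o 2 then acc2
            else acc2 ++ [[pvG t 0, "treats", pvG o 2]]
          else acc2) acc
      else acc) []
  let di := kg_triplets.foldl (fun acc t =>
      if pvG t 1 = "diagnosis" then
        kg_triplets.foldl (fun acc2 o =>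
          if pvG o 0 = pvG t 0 ∧ pvG o 1 = "interacts_with" then
            if pvG o 2 = pvG t 0 then acc2
            else acc2 ++ [[pvG o 2, "diagnosis", pvG t 0]]
          else acc2) acc
      else acc) []
  let cj := kg_triplets.foldl (fun acc t =>
      if pvG t 1 = "co-occurs_with" then
        kg_triplets.foldl (fun acc2 o =>
          if pvG o 0 = pvG t 0 ∧ pvG o 1 = "affects" then
            if pvG t 2 = pvG o 2 then acc2
            else acc2 ++ [[pvG t 2, "co-occurs_with", pvG o 2]]
          else acc2) acc
      else acc) []
  let dj := kg_triplets.foldl (fun acc t =>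
      if pvG t 1 = "prevents" then
        kg_triplets.foldl (fun acc2 o =>
          if pvG o 1 = "causes" ∧ pvG o 0 = pvG t 2 then
            acc2 ++ [[pvG t 0, "prevents", pvG o 2], [pvG t 0, "causes", pvG o 2]]
          else acc2) acc
      else acc) []
  [pvParseTriple (pvRemoveDuplicate co), pvParseTriple (pvRemoveDuplicate pr),
   pvParseTriple (pvRemoveDuplicate tr), pvParseTriple (pvRemoveDuplicate di),
   pvParseTriple (pvRemoveDuplicate cj), pvParseTriple (pvRemoveDuplicate dj)]

-- ===== PORT B =====
-- dedup (seen set + out list), truncate to 40, pad with NAF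
def pvFinish (l : List (List String)) : List (List String) :=
  let out := (l.foldl
      (fun (p : PySem.Set (List String) × List (List String)) t =>
        if t ∈ p.1 then p else (PySem.Set.add p.1 t, p.2 ++ [t]))
      (PySem.Set.ofList [], [])).2
  let out := out.take 40
  out ++ List.replicate (40 - out.length) pvNAF

-- the (subject, relation) → objects index (Python: idx.setdefault((t[0], t[1]), []).append(t[2]))
def pvIdx (kg : List (List String)) : PySem.Dict (String × String) (List String) :=
  kg.foldl (fun d t => d.modify (pvG t 0, pvG t 1) [] (· ++ [pvG t 2])) PySem.Dict.empty

abbrev PvS6 := List (List String) × List (List String) × List (List String) ×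
  List (List String) × List (List String) × List (List String)

def pvStep (idx : PySem.Dict (String × String) (List String)) (s : PvS6) (t : List String) : PvS6 :=
  let (co, pr, tr, di, cj, dj) := s
  let rel := pvG t 1
  if rel = "co-occurs_with" then
    let co := (idx.getD (pvG t 2, "affects") []).foldl
        (fun acc z => if pvG t 0 ≠ z then acc ++ [[pvG t 0, "affects", z]] else acc) co
    let cj := (idx.getD (pvG t 0, "affects") []).foldl
        (fun acc z => if pvG t 2 ≠ z then acc ++ [[pvG t 2, "co-occurs_with", z]] else acc) cj
    (co, pr, tr, di, cj, dj)
  else if rel = "prevents" then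
    let zs := idx.getD (pvG t 2, "causes") []
    let pr := zs.foldl
        (fun acc z => if pvG t 0 ≠ z then acc ++ [[pvG t 0, "prevents", z]] else acc) pr
    let dj := zs.foldl
        (fun acc z => acc ++ [[pvG t 0, "prevents", z]] ++ [[pvG t 0, "causes", z]]) dj
    (co, pr, tr, di, cj, dj)
  else if rel = "treats" then
    let tr := (idx.getD (pvG t 2, "is_a") []).foldl
        (fun acc z => if pvG t 0 ≠ z then acc ++ [[pvG t 0, "treats", z]] else acc) tr
    (co, pr, tr, di, cj, dj)
  else if rel = "diagnosis" then
    let di := (idx.getD (pvG t 0, "interacts_with") []).foldl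
        (fun acc z => if z ≠ pvG t 0 then acc ++ [[z, "diagnosis", pvG t 0]] else acc) di
    (co, pr, tr, di, cj, dj)
  else s

def apply_rules_to_kg_alt (kg_triplets : List (List String)) : List (List (List String)) :=
  let idx := pvIdx kg_triplets
  let s := kg_triplets.foldl (pvStep idx) ([], [], [], [], [], [])
  [pvFinish s.1, pvFinish s.2.1, pvFinish s.2.2.1, pvFinish s.2.2.2.1,
   pvFinish s.2.2.2.2.1, pvFinish s.2.2.2.2.2]

-- ===== PRECONDITION & SPEC =====
-- Pre_ excludes inputs containing a triplet with fewer than 3 fields: A raises IndexError on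
-- them whenever a relevant relation forces it to read a missing field (and still returns on
-- some, e.g. [['a','x']]), while B, which indexes all three fields of every triplet up front,
-- raises IndexError on all of them.
def Pre_apply_rules_to_kg (kg_triplets : List (List String)) : Prop :=
  ∀ t ∈ kg_triplets, 3 ≤ t.length
instance (kg_triplets : List (List String)) : Decidable (Pre_apply_rules_to_kg kg_triplets) := by
  unfold Pre_apply_rules_to_kg; infer_instance

def pvWitness_apply_rules_to_kg : List (List String) :=
  [["a", "co-occurs_with", "b"], ["b", "affects", "c"], ["a", "prevents", "b"]]

def Spec_apply_rules_to_kg (kg_triplets : List (List String)) (out : List (List (List String))) : Prop := out = apply_rules_to_kg_alt kg_triplets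
instance (kg_triplets : List (List String)) (out : List (List (List String))) : Decidable (Spec_apply_rules_to_kg kg_triplets out) := by unfold Spec_apply_rules_to_kg; infer_instance

-- ===== CLAIM (what is proved, stated in full; the proofs are below) =====
def Claim_equal_apply_rules_to_kg : Prop := ∀ (kg_triplets : List (List String)), Dom_apply_rules_to_kg kg_triplets → Pre_apply_rules_to_kg kg_triplets → Spec_apply_rules_to_kg kg_triplets (apply_rules_to_kg kg_triplets)

-- ===== LEMMAS AND PROOFS =====

theorem pvIdx_getD (kg : List (List String)) (s r : String) :
    (pvIdx kg).getD (s, r) [] =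
      (kg.filter (fun o => pvG o 0 == s && pvG o 1 == r)).map (fun o => pvG o 2) := by
  have h1 : pvIdx kg =
      (kg.map (fun t => ((pvG t 0, pvG t 1), pvG t 2))).foldl
        (fun d (p : (String × String) × String) => d.modify p.1 [] (· ++ [p.2]))
        PySem.Dict.empty := by
    rw [List.foldl_map]; rfl
  rw [h1, PySem.Dict.getD_foldl_modify_append, PySem.Dict.getD_empty, List.filter_map,
    List.map_map]
  congr 1

theorem pvFlatMap_filter {α β : Type} (l : List α) (p : α → Bool) (h : α → List β) :
    (l.filter p).flatMap h = l.flatMap (fun x => if p x then h x else []) := by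
  induction l with
  | nil => rfl
  | cons x xs ih => by_cases hp : p x <;> simp [hp, ih]

theorem pvInner_eq (kg : List (List String)) (S R : String)
    (h : String → List (List String)) (acc : List (List String)) :
    ((pvIdx kg).getD (S, R) []).foldl (fun a z => a ++ h z) acc
      = kg.foldl (fun a o => if pvG o 0 = S ∧ pvG o 1 = R then a ++ h (pvG o 2) else a) acc := by
  rw [pvIdx_getD, PySem.List.foldl_append_eq_flatMap, List.flatMap_map, pvFlatMap_filter]
  have : (kg.foldl (fun a o => if pvG o 0 = S ∧ pvG o 1 = R then a ++ h (pvG o 2) else a) acc)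
      = kg.foldl (fun a o => a ++ (if pvG o 0 == S && pvG o 1 == R then h (pvG o 2) else [])) acc := by
    apply PySem.List.foldl_congr_mem
    intro a o _
    by_cases hp : pvG o 0 = S ∧ pvG o 1 = R
    · simp [hp]
    · simp only [if_neg hp]
      rw [if_neg (by simpa using hp), List.append_nil]
  rw [this, PySem.List.foldl_append_eq_flatMap]
theorem pvStep_comp (idx : PySem.Dict (String × String) (List String)) (s : PvS6) (t : List String) :
    pvStep idx s t =
      ((pvStep idx (s.1, [], [], [], [], []) t).1,
       (pvStep idx ([], s.2.1, [], [], [], []) t).2.1,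
       (pvStep idx ([], [], s.2.2.1, [], [], []) t).2.2.1,
       (pvStep idx ([], [], [], s.2.2.2.1, [], []) t).2.2.2.1,
       (pvStep idx ([], [], [], [], s.2.2.2.2.1, []) t).2.2.2.2.1,
       (pvStep idx ([], [], [], [], [], s.2.2.2.2.2) t).2.2.2.2.2) := by
  obtain ⟨a, b, c, d, e, f⟩ := s
  simp only [pvStep]
  split_ifs <;> rfl

theorem pvFused_eq (idx : PySem.Dict (String × String) (List String))
    (kg : List (List String)) (s : PvS6) :
    kg.foldl (pvStep idx) s =
      (kg.foldl (fun a t => (pvStep idx (a, [], [], [], [], []) t).1) s.1,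
       kg.foldl (fun a t => (pvStep idx ([], a, [], [], [], []) t).2.1) s.2.1,
       kg.foldl (fun a t => (pvStep idx ([], [], a, [], [], []) t).2.2.1) s.2.2.1,
       kg.foldl (fun a t => (pvStep idx ([], [], [], a, [], []) t).2.2.2.1) s.2.2.2.1,
       kg.foldl (fun a t => (pvStep idx ([], [], [], [], a, []) t).2.2.2.2.1) s.2.2.2.2.1,
       kg.foldl (fun a t => (pvStep idx ([], [], [], [], [], a) t).2.2.2.2.2) s.2.2.2.2.2) := by
  induction kg generalizing s with
  | nil => rfl
  | cons t kg ih =>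
    simp only [List.foldl_cons]
    rw [ih, pvStep_comp]

theorem pvDedup_aux (l : List (List String)) :
    ∀ (seen : PySem.Set (List String)) (res : List (List String)),
      (∀ x, x ∈ seen ↔ x ∈ res) →
      (l.foldl (fun (p : PySem.Set (List String) × List (List String)) t =>
          if t ∈ p.1 then p else (PySem.Set.add p.1 t, p.2 ++ [t])) (seen, res)).2 =
        l.foldl (fun res x => if x ∈ res then res else res ++ [x]) res := by
  induction l with
  | nil => intro seen res h; rfl
  | cons t l ih =>
    intro seen res h
    simp only [List.foldl_cons]
    by_cases ht : t ∈ seen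
    · rw [if_pos ht, if_pos ((h t).mp ht)]
      exact ih seen res h
    · rw [if_neg ht, if_neg (fun hr => ht ((h t).mpr hr))]
      refine ih _ _ ?_
      intro x
      rw [PySem.Set.mem_add]
      simp only [List.mem_append, List.mem_singleton]
      rw [h x]

theorem pvFinish_eq (l : List (List String)) :
    pvFinish l = pvParseTriple (pvRemoveDuplicate l) := by
  unfold pvFinish pvParseTriple pvRemoveDuplicate
  rw [pvDedup_aux l (PySem.Set.ofList []) [] (by simp [PySem.Set.ofList])]
  set d := l.foldl (fun res x => if x ∈ res then res else res ++ [x]) [] with hd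
  show d.take 40 ++ List.replicate (40 - (d.take 40).length) pvNAF =
    (if d.length ≤ 40 then d ++ List.replicate (40 - d.length) pvNAF else d).take 40
  by_cases h : d.length ≤ 40
  · have e1 : d.take 40 = d := List.take_of_length_le h
    rw [if_pos h, e1, List.take_of_length_le (by simp; omega)]
  · rw [if_neg h]
    have h40 : (d.take 40).length = 40 := by simp; omega
    rw [h40]
    simp

theorem pvRuleCo (kg : List (List String)) :
    kg.foldl (fun a t => (pvStep (pvIdx kg) (a, [], [], [], [], []) t).1) [] =
    kg.foldl (fun acc t =>
      if pvG t 1 = "co-occurs_with" then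
        kg.foldl (fun acc2 o =>
          if pvG o 0 = pvG t 2 ∧ pvG o 1 = "affects" then
          if pvG t 0 = pvG o 2 then acc2
          else acc2 ++ [[pvG t 0, "affects", pvG o 2]]
        else acc2) acc
      else acc) [] := by
  apply PySem.List.foldl_congr_mem
  intro a t _
  by_cases hrel : pvG t 1 = "co-occurs_with"
  · simp only [pvStep, hrel, reduceIte, String.reduceEq]
    have hB : ∀ (acc0 : List (List String)),
        ((pvIdx kg).getD (pvG t 2, "affects") []).foldl
          (fun acc z => acc ++ (fun z => if pvG t 0 = z then [] else [[pvG t 0, "affects", z]]) z) acc0 =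
        kg.foldl (fun acc2 o =>
          if pvG o 0 = pvG t 2 ∧ pvG o 1 = "affects" then
          if pvG t 0 = pvG o 2 then acc2
          else acc2 ++ [[pvG t 0, "affects", pvG o 2]]
        else acc2) acc0 := by
      intro acc0
      rw [pvInner_eq kg _ _ (fun z => if pvG t 0 = z then [] else [[pvG t 0, "affects", z]]) acc0]
      apply PySem.List.foldl_congr_mem
      intro a2 o _
      split_ifs <;> simp_all
    rw [← hB a]
    apply PySem.List.foldl_congr_mem
    intro a2 z _
    split_ifs <;> simp_all
  · simp only [pvStep, hrel, reduceIte]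
    split_ifs <;> rfl

theorem pvRulePr (kg : List (List String)) :
    kg.foldl (fun a t => (pvStep (pvIdx kg) ([], a, [], [], [], []) t).2.1) [] =
    kg.foldl (fun acc t =>
      if pvG t 1 = "prevents" then
        kg.foldl (fun acc2 o =>
          if pvG o 0 = pvG t 2 ∧ pvG o 1 = "causes" then
          if pvG t 0 = pvG o 2 then acc2
          else acc2 ++ [[pvG t 0, "prevents", pvG o 2]]
        else acc2) acc
      else acc) [] := by
  apply PySem.List.foldl_congr_mem
  intro a t _
  by_cases hrel : pvG t 1 = "prevents"
  · simp only [pvStep, hrel, reduceIte, String.reduceEq]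
    have hB : ∀ (acc0 : List (List String)),
        ((pvIdx kg).getD (pvG t 2, "causes") []).foldl
          (fun acc z => acc ++ (fun z => if pvG t 0 = z then [] else [[pvG t 0, "prevents", z]]) z) acc0 =
        kg.foldl (fun acc2 o =>
          if pvG o 0 = pvG t 2 ∧ pvG o 1 = "causes" then
          if pvG t 0 = pvG o 2 then acc2
          else acc2 ++ [[pvG t 0, "prevents", pvG o 2]]
        else acc2) acc0 := by
      intro acc0
      rw [pvInner_eq kg _ _ (fun z => if pvG t 0 = z then [] else [[pvG t 0, "prevents", z]]) acc0]
      apply PySem.List.foldl_congr_mem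
      intro a2 o _
      split_ifs <;> simp_all
    rw [← hB a]
    apply PySem.List.foldl_congr_mem
    intro a2 z _
    split_ifs <;> simp_all
  · simp only [pvStep, hrel, reduceIte]
    split_ifs <;> rfl

theorem pvRuleTr (kg : List (List String)) :
    kg.foldl (fun a t => (pvStep (pvIdx kg) ([], [], a, [], [], []) t).2.2.1) [] =
    kg.foldl (fun acc t =>
      if pvG t 1 = "treats" then
        kg.foldl (fun acc2 o =>
          if pvG o 0 = pvG t 2 ∧ pvG o 1 = "is_a" then
          if pvG t 0 = pvG o 2 then acc2
          else acc2 ++ [[pvG t 0, "treats", pvG o 2]]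
        else acc2) acc
      else acc) [] := by
  apply PySem.List.foldl_congr_mem
  intro a t _
  by_cases hrel : pvG t 1 = "treats"
  · simp only [pvStep, hrel, reduceIte, String.reduceEq]
    have hB : ∀ (acc0 : List (List String)),
        ((pvIdx kg).getD (pvG t 2, "is_a") []).foldl
          (fun acc z => acc ++ (fun z => if pvG t 0 = z then [] else [[pvG t 0, "treats", z]]) z) acc0 =
        kg.foldl (fun acc2 o =>
          if pvG o 0 = pvG t 2 ∧ pvG o 1 = "is_a" then
          if pvG t 0 = pvG o 2 then acc2
          else acc2 ++ [[pvG t 0, "treats", pvG o 2]]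
        else acc2) acc0 := by
      intro acc0
      rw [pvInner_eq kg _ _ (fun z => if pvG t 0 = z then [] else [[pvG t 0, "treats", z]]) acc0]
      apply PySem.List.foldl_congr_mem
      intro a2 o _
      split_ifs <;> simp_all
    rw [← hB a]
    apply PySem.List.foldl_congr_mem
    intro a2 z _
    split_ifs <;> simp_all
  · simp only [pvStep, hrel, reduceIte]
    split_ifs <;> rfl

theorem pvRuleDi (kg : List (List String)) :
    kg.foldl (fun a t => (pvStep (pvIdx kg) ([], [], [], a, [], []) t).2.2.2.1) [] =
    kg.foldl (fun acc t =>
      if pvG t 1 = "diagnosis" then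
        kg.foldl (fun acc2 o =>
          if pvG o 0 = pvG t 0 ∧ pvG o 1 = "interacts_with" then
          if pvG o 2 = pvG t 0 then acc2
          else acc2 ++ [[pvG o 2, "diagnosis", pvG t 0]]
        else acc2) acc
      else acc) [] := by
  apply PySem.List.foldl_congr_mem
  intro a t _
  by_cases hrel : pvG t 1 = "diagnosis"
  · simp only [pvStep, hrel, reduceIte, String.reduceEq]
    have hB : ∀ (acc0 : List (List String)),
        ((pvIdx kg).getD (pvG t 0, "interacts_with") []).foldl
          (fun acc z => acc ++ (fun z => if z = pvG t 0 then [] else [[z, "diagnosis", pvG t 0]]) z) acc0 =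
        kg.foldl (fun acc2 o =>
          if pvG o 0 = pvG t 0 ∧ pvG o 1 = "interacts_with" then
          if pvG o 2 = pvG t 0 then acc2
          else acc2 ++ [[pvG o 2, "diagnosis", pvG t 0]]
        else acc2) acc0 := by
      intro acc0
      rw [pvInner_eq kg _ _ (fun z => if z = pvG t 0 then [] else [[z, "diagnosis", pvG t 0]]) acc0]
      apply PySem.List.foldl_congr_mem
      intro a2 o _
      split_ifs <;> simp_all
    rw [← hB a]
    apply PySem.List.foldl_congr_mem
    intro a2 z _
    split_ifs <;> simp_all
  · simp only [pvStep, hrel, reduceIte]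
    split_ifs <;> rfl

theorem pvRuleCj (kg : List (List String)) :
    kg.foldl (fun a t => (pvStep (pvIdx kg) ([], [], [], [], a, []) t).2.2.2.2.1) [] =
    kg.foldl (fun acc t =>
      if pvG t 1 = "co-occurs_with" then
        kg.foldl (fun acc2 o =>
          if pvG o 0 = pvG t 0 ∧ pvG o 1 = "affects" then
          if pvG t 2 = pvG o 2 then acc2
          else acc2 ++ [[pvG t 2, "co-occurs_with", pvG o 2]]
        else acc2) acc
      else acc) [] := by
  apply PySem.List.foldl_congr_mem
  intro a t _
  by_cases hrel : pvG t 1 = "co-occurs_with"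
  · simp only [pvStep, hrel, reduceIte, String.reduceEq]
    have hB : ∀ (acc0 : List (List String)),
        ((pvIdx kg).getD (pvG t 0, "affects") []).foldl
          (fun acc z => acc ++ (fun z => if pvG t 2 = z then [] else [[pvG t 2, "co-occurs_with", z]]) z) acc0 =
        kg.foldl (fun acc2 o =>
          if pvG o 0 = pvG t 0 ∧ pvG o 1 = "affects" then
          if pvG t 2 = pvG o 2 then acc2
          else acc2 ++ [[pvG t 2, "co-occurs_with", pvG o 2]]
        else acc2) acc0 := by
      intro acc0
      rw [pvInner_eq kg _ _ (fun z => if pvG t 2 = z then [] else [[pvG t 2, "co-occurs_with", z]]) acc0]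
      apply PySem.List.foldl_congr_mem
      intro a2 o _
      split_ifs <;> simp_all
    rw [← hB a]
    apply PySem.List.foldl_congr_mem
    intro a2 z _
    split_ifs <;> simp_all
  · simp only [pvStep, hrel, reduceIte]
    split_ifs <;> rfl

theorem pvRuleDj (kg : List (List String)) :
    kg.foldl (fun a t => (pvStep (pvIdx kg) ([], [], [], [], [], a) t).2.2.2.2.2) [] =
    kg.foldl (fun acc t =>
      if pvG t 1 = "prevents" then
        kg.foldl (fun acc2 o =>
          if pvG o 1 = "causes" ∧ pvG o 0 = pvG t 2 then
          acc2 ++ [[pvG t 0, "prevents", pvG o 2], [pvG t 0, "causes", pvG o 2]]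
        else acc2) acc
      else acc) [] := by
  apply PySem.List.foldl_congr_mem
  intro a t _
  by_cases hrel : pvG t 1 = "prevents"
  · simp only [pvStep, hrel, reduceIte, String.reduceEq]
    have hB : ∀ (acc0 : List (List String)),
        ((pvIdx kg).getD (pvG t 2, "causes") []).foldl
          (fun acc z => acc ++ (fun z => [[pvG t 0, "prevents", z], [pvG t 0, "causes", z]]) z) acc0 =
        kg.foldl (fun acc2 o =>
          if pvG o 1 = "causes" ∧ pvG o 0 = pvG t 2 then
          acc2 ++ [[pvG t 0, "prevents", pvG o 2], [pvG t 0, "causes", pvG o 2]]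
        else acc2) acc0 := by
      intro acc0
      rw [pvInner_eq kg _ _ (fun z => [[pvG t 0, "prevents", z], [pvG t 0, "causes", z]]) acc0]
      apply PySem.List.foldl_congr_mem
      intro a2 o _
      split_ifs <;> simp_all
    rw [← hB a]
    apply PySem.List.foldl_congr_mem
    intro a2 z _
    simp
  · simp only [pvStep, hrel, reduceIte]
    split_ifs <;> rfl

-- ===== VERDICT (by name: the statement is the Claim_ definition above) =====
theorem apply_rules_to_kg_spec : Claim_equal_apply_rules_to_kg := by
  intro kg _ _
  unfold Spec_apply_rules_to_kg apply_rules_to_kg apply_rules_to_kg_alt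
  simp only [pvFused_eq, pvFinish_eq]
  rw [pvRuleCo kg, pvRulePr kg, pvRuleTr kg, pvRuleDi kg, pvRuleCj kg, pvRuleDj kg]
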